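-- pv_equiv track=rewrite | github.com/huseyin/color | color/color.py | tr_iter
-- ===== SOURCE A (Python) =====
-- from enum import Enum
--
-- COLORIZE_FORMAT = "\033[{:d};{:d};{:d}m{!s}\033[0m"
--
-- class BgColor(Enum):
--     Black   = 40
--     Red     = 41
--     Green   = 42
--     Yellow  = 43
--     Blue    = 44
--     Magenta = 45
--     Cyan    = 46
--     White   = 47
--     Null    = 10
--
-- class Base(Enum):
--     Reset        = 0
--     Bold         = 1
--     Faint        = 2
--     Italic       = 3
--     Underline    = 4
--     BlinkSlow    = 5
--     BlinkRapid   = 6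
--     ReverseVideo = 7
--     Concealed    = 8
--     CrossedOut   = 9
--     Null         = 10
--
-- def _to_int(member):
--     try:
--         return member.value
--     except:
--         return member
--
-- def colorize(bg, base, fg, *text):
--     """ colorize(bg, base, fg, *text)
--     """
--     # All argument types must be str.
--     rtext = [str(f) for f in text]
--
--     return COLORIZE_FORMAT.format(
--         _to_int(bg), _to_int(base), _to_int(fg), ''.join(rtext)
--     )
--
-- def tr_iter(text, kword, color):
--     """ tr_iter(text, kword, color)
--     """
--     s=''
--     for _t in text:
--         if _t in kword:
--             s += colorize(BgColor.Null, Base.Null, color, _t)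
--         else:
--             s += _t
--     return s
-- ===== SOURCE B (Python) =====
-- def tr_iter(text, kword, color):
--     """ tr_iter(text, kword, color)
--     """
--     table = {ord(c): "\033[{:d};{:d};{:d}m{!s}\033[0m".format(10, 10, color, c)
--              for c in kword}
--     return text.translate(table)
-- ===== Notes on version B (the rewrite author's own statement) =====
-- stated objective: idiomatic
-- what changed: B precomputes a translation table (dict from character code to its colorized string) once from kword and returns text.translate(table), replacing A's per-character membership scan and string concatenation loop.
import Mathlib
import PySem

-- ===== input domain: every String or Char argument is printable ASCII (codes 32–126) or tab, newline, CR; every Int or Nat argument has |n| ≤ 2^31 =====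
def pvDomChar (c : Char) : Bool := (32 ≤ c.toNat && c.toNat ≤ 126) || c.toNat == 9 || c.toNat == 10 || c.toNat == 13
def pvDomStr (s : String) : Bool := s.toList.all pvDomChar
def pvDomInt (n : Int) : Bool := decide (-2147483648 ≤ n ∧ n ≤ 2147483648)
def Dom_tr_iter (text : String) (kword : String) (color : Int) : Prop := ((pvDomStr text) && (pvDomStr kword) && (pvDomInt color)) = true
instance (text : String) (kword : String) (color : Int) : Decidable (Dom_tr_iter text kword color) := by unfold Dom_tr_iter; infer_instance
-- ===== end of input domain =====

-- B builds the colorized-replacement table once and translates in one pass, instead of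
-- A's per-character membership test with string concatenation; return values are equal.

-- colorize(BgColor.Null, Base.Null, color, c) = "\x1b[10;10;" + str(color) + "m" + c + "\x1b[0m"
-- (shared by both Pythons: A calls colorize per character, B bakes it into the table)
def pvColorize (color : Int) (c : Char) : List Char :=
  (Char.ofNat 27) :: '[' :: '1' :: '0' :: ';' :: '1' :: '0' :: ';' ::
    ((PySem.Int.toStr color).toList ++
      ('m' :: c :: (Char.ofNat 27) :: '[' :: '0' :: 'm' :: []))

-- ===== PORT A =====
-- `_t in kword` for a single character _t of a str is exactly character membership.
def tr_iter (text : String) (kword : String) (color : Int) : String :=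
  String.mk (text.toList.foldl
    (fun s c => s ++ (if kword.toList.contains c then pvColorize color c else [c])) [])

-- ===== PORT B =====
-- table = {ord(c): colorized(c) for c in kword}; text.translate(table) maps each char
-- through the table (identity when absent) and concatenates.
def tr_iter_alt (text : String) (kword : String) (color : Int) : String :=
  let table : PySem.Dict Char (List Char) :=
    kword.toList.foldl (fun d c => d.insert c (pvColorize color c)) PySem.Dict.empty
  String.mk ((text.toList.map (fun c => table.getD c [c])).flatten)

-- ===== PRECONDITION & SPEC =====
def Spec_tr_iter (text : String) (kword : String) (color : Int) (out : String) : Prop := out = tr_iter_alt text kword color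
instance (text : String) (kword : String) (color : Int) (out : String) : Decidable (Spec_tr_iter text kword color out) := by unfold Spec_tr_iter; infer_instance

-- ===== CLAIM (what is proved, stated in full; the proofs are below) =====
def Claim_equal_tr_iter : Prop := ∀ (text : String) (kword : String) (color : Int), Dom_tr_iter text kword color → Spec_tr_iter text kword color (tr_iter text kword color)

-- ===== LEMMAS AND PROOFS =====

-- The table built from kword answers exactly A's membership test (duplicates in kword
-- overwrite with the same value, so the first/last-write distinction is invisible).
lemma getD_table (l : List Char) (color : Int) (x : Char) (d : PySem.Dict Char (List Char)) :
    (l.foldl (fun d c => d.insert c (pvColorize color c)) d).getD x [x]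
      = if l.contains x then pvColorize color x else d.getD x [x] := by
  induction l generalizing d with
  | nil => simp
  | cons a t ih =>
    simp only [List.foldl_cons, ih, List.contains_cons]
    by_cases h : x = a
    · subst h
      by_cases ht : t.contains x <;> simp [PySem.Dict.getD_insert_self, ht]
    · simp [PySem.Dict.getD_insert, h]

-- ===== VERDICT (by name: the statement is the Claim_ definition above) =====
theorem tr_iter_spec : Claim_equal_tr_iter := by
  intro text kword color _
  show _ = tr_iter_alt text kword color
  unfold tr_iter tr_iter_alt
  rw [PySem.List.foldl_append_eq_flatMap]
  simp only [List.flatMap_def, List.nil_append]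
  congr 1
  congr 1
  apply List.map_congr_left
  intro c _
  rw [getD_table]
  simp [PySem.Dict.getD_empty]
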